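-- pv_equiv track=rewrite | github.com/zzhang2293/coding_note | template/basic/bit_operation/example.py | subsequenceSumOr
-- ===== SOURCE A (Python) =====
-- from typing import List
--
-- def subsequenceSumOr(nums: List[int]) -> int:
--     """
--     给一个数组，输出 按位OR的 所有子序列的sum值
--     例如：1，2，3 子序列 [1, 2]的sum值就是3
--     这题从小bit到大bit枚举，看是不是每一位上都能够得到 1如果能得到1说明有某个子序列那一位上能提供1个1
--     :param nums: 数组
--     :return:
--     """
--     ans = 0
--     for bit in range(60):
--         s, tail = 0, (1 << (bit + 1)) - 1
--         for num in nums: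
--             s += num & tail
--         if s >= 1 << bit:
--             ans |= 1 << bit
--     return ans
-- ===== SOURCE B (Python) =====
-- from typing import List
--
-- def subsequenceSumOr(nums: List[int]) -> int:
--     # Build per-bit population counts once, then one accumulating pass:
--     # running after bit b equals the sum of everyone's low (b+1) bits.
--     count = [sum((num >> b) & 1 for num in nums) for b in range(60)]
--     ans = 0
--     running = 0
--     for bit in range(60):
--         running += count[bit] << bit
--         if running >= 1 << bit:
--             ans |= 1 << bit
--     return ans
-- ===== Notes on version B (the rewrite author's own statement) =====
-- stated objective: alternative
-- what changed: A re-sums all masked numbers from scratch for each of the 60 bits; B builds a per-bit popcount table once and then a single accumulating pass keeps a running sum of everyone's low bits, replacing the nested re-summation.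
import Mathlib
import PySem

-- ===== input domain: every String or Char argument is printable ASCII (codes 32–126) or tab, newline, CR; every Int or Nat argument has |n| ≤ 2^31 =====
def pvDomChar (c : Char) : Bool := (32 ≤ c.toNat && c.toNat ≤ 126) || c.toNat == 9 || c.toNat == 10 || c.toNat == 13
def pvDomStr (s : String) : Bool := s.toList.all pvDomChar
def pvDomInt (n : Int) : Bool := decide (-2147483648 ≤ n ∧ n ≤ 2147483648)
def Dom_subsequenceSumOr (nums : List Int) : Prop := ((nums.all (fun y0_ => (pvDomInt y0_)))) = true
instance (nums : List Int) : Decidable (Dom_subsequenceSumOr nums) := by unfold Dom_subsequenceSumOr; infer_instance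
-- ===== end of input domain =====

-- ===== PORT A =====
-- B replaces A's per-bit re-summation of masked numbers by a popcount table plus one accumulating pass (alternative decomposition, same asymptotics).
def subsequenceSumOr (nums : List Int) : Int :=
  (List.range 60).foldl
    (fun ans bit =>
      let tail : Int := (1 <<< (bit + 1)) - 1
      let s : Int := nums.foldl (fun s num => s + PySem.Int.band num tail) 0
      if s ≥ (1 : Int) <<< bit then PySem.Int.bor ans ((1 : Int) <<< bit) else ans)
    0

-- ===== PORT B =====
def subsequenceSumOr_alt (nums : List Int) : Int :=
  let count : List Int :=
    (List.range 60).map (fun b => nums.foldl (fun s num => s + PySem.Int.band (num >>> b) 1) 0)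
  let res : Int × Int :=
    (List.range 60).foldl
      (fun (st : Int × Int) bit =>
        let running : Int := st.2 + (count.getD bit 0) <<< bit
        (if running ≥ (1 : Int) <<< bit then PySem.Int.bor st.1 ((1 : Int) <<< bit) else st.1,
         running))
      (0, 0)
  res.1

-- ===== PRECONDITION & SPEC =====
def Spec_subsequenceSumOr (nums : List Int) (out : Int) : Prop := out = subsequenceSumOr_alt nums
instance (nums : List Int) (out : Int) : Decidable (Spec_subsequenceSumOr nums out) := by unfold Spec_subsequenceSumOr; infer_instance

-- ===== CLAIM (what is proved, stated in full; the proofs are below) =====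
def Claim_equal_subsequenceSumOr : Prop := ∀ (nums : List Int), Dom_subsequenceSumOr nums → Spec_subsequenceSumOr nums (subsequenceSumOr nums)

-- ===== LEMMAS AND PROOFS =====

theorem pv_neg_emod (n : Nat) (M : Int) (hM : 0 < M) :
    (-(n:Int) - 1) % M = M - 1 - (n:Int) % M := by
  have h1 : (0:Int) ≤ (n:Int) % M := Int.emod_nonneg _ (by omega)
  have h2 : (n:Int) % M < M := Int.emod_lt_of_pos _ hM
  have hn : (n:Int) = M * ((n:Int)/M) + (n:Int)%M := (Int.mul_ediv_add_emod _ _).symm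
  have hrw : -(n:Int) - 1 = (M - 1 - (n:Int)%M) + M * (-(((n:Int)/M) + 1)) := by
    conv_lhs => rw [hn]
    ring
  rw [hrw, Int.add_mul_emod_self_left, Int.emod_eq_of_lt (by omega) (by omega)]

theorem pv_band_mask (a : Int) (k : Nat) :
    PySem.Int.band a ((2 : Int) ^ k - 1) = a % (2 : Int) ^ k := by
  have h2 : (0:Int) < 2 ^ k := by positivity
  have h1 : (1:Nat) ≤ 2^k := Nat.one_le_two_pow
  have hcast : ((2:Int)^k - 1) = (((2^k - 1 : Nat)) : Int) := by push_cast [h1]; ring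
  rcases le_or_gt 0 a with ha | ha
  · rw [PySem.Int.band_of_nonneg ha (by omega)]
    have hA : a = ((a.toNat : Nat) : Int) := (Int.toNat_of_nonneg ha).symm
    rw [hA, hcast]
    norm_cast
    rw [Nat.and_two_pow_sub_one_eq_mod]
  · unfold PySem.Int.band
    rw [if_neg (by omega), if_pos (by omega)]
    set n : Nat := (-a - 1).toNat with hn
    have han : a = -(n:Int) - 1 := by
      have : (0:Int) ≤ -a - 1 := by omega
      rw [hn, Int.toNat_of_nonneg this]; ring
    have htn : ((2:Int)^k - 1).toNat = 2^k - 1 := by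
      rw [hcast, Int.toNat_natCast]
    rw [htn, Nat.land_comm, Nat.and_two_pow_sub_one_eq_mod, han, pv_neg_emod n _ h2]
    have hmcast : ((n % 2^k : Nat) : Int) = (n:Int) % (2:Int)^k := by push_cast; ring
    have hle : n % 2^k < 2^k := Nat.mod_lt _ (by omega)
    push_cast [Nat.le_sub_one_of_lt hle]
    omega

theorem pv_emod_split (a : Int) (k : Nat) :
    a % (2 : Int) ^ (k + 1) = a % (2 : Int) ^ k + ((a / (2 : Int) ^ k) % 2) * 2 ^ k := by
  have hN : (0:Int) < 2 ^ k := by positivity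
  set N : Int := 2 ^ k with hNdef
  set q : Int := a / N with hq
  set r : Int := a % N with hr
  have hrb : 0 ≤ r ∧ r < N := ⟨Int.emod_nonneg _ (by omega), Int.emod_lt_of_pos _ hN⟩
  have ha : a = N * q + r := (Int.mul_ediv_add_emod _ _).symm
  have hq2 : 0 ≤ q % 2 ∧ q % 2 < 2 := ⟨Int.emod_nonneg _ (by omega), Int.emod_lt_of_pos _ (by omega)⟩
  have hqq : q = 2 * (q / 2) + q % 2 := (Int.mul_ediv_add_emod _ _).symm
  have hrw : a = ((q % 2) * N + r) + (2 * N) * (q / 2) := by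
    conv_lhs => rw [ha]; rw [hqq]
    ring
  have hpow : (2:Int) ^ (k+1) = 2 * N := by rw [hNdef, pow_succ]; ring
  rw [hpow, hrw, Int.add_mul_emod_self_left,
    Int.emod_eq_of_lt (by nlinarith [hq2.1, hrb.1]) (by nlinarith [hq2.2, hrb.2, hq2.1, hrb.1])]
  ring

theorem pv_num_step (a : Int) (k : Nat) :
    PySem.Int.band a ((1 <<< (k + 1)) - 1)
      = PySem.Int.band a ((1 <<< k) - 1) + (PySem.Int.band (a >>> k) 1) * 2 ^ k := by
  have h1 : (((1 <<< (k+1) : Nat)) : Int) = 2 ^ (k+1) := by push_cast [Nat.one_shiftLeft]; ring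
  have h2 : (((1 <<< k : Nat)) : Int) = 2 ^ k := by push_cast [Nat.one_shiftLeft]; ring
  rw [h1, h2, pv_band_mask, pv_band_mask, PySem.Int.band_one, pv_emod_split]
  congr 1
  rw [Int.shiftRight_eq_div_pow]
  have : PySem.Int.mod (a / 2^k) 2 = (a / 2^k) % 2 := by
    simp [PySem.Int.mod, Int.fmod_eq_emod]
  push_cast at this ⊢
  rw [this]

def pvCnt (nums : List Int) (b : Nat) : Int :=
  nums.foldl (fun (s num : Int) => s + PySem.Int.band (num >>> b) 1) 0

def pvMsum (nums : List Int) (k : Nat) : Int :=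
  nums.foldl (fun s num => s + PySem.Int.band num ((1 <<< (k + 1)) - 1)) 0

def pvP (nums : List Int) (m : Nat) : Int :=
  ((List.range m).map (fun b => pvCnt nums b * 2 ^ b)).sum

theorem pv_foldl_add (f : Int → Int) (nums : List Int) (a : Int) :
    nums.foldl (fun s num => s + f num) a = a + (nums.map f).sum := by
  induction nums generalizing a with
  | nil => simp
  | cons x xs ih => simp [List.foldl, ih]; ring

theorem pv_sum_map_add (g h : Int → Int) (l : List Int) :
    (l.map (fun x => g x + h x)).sum = (l.map g).sum + (l.map h).sum := by
  induction l with
  | nil => simp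
  | cons x xs ih => simp [ih]; ring

theorem pv_sum_map_mul (g : Int → Int) (c : Int) (l : List Int) :
    (l.map (fun x => g x * c)).sum = (l.map g).sum * c := by
  induction l with
  | nil => simp
  | cons x xs ih => simp [ih]; ring

theorem pv_P_succ (nums : List Int) (m : Nat) :
    pvP nums (m + 1) = pvP nums m + pvCnt nums m * 2 ^ m := by
  simp [pvP, List.range_succ]

theorem pv_msum_eq_P (nums : List Int) (k : Nat) :
    pvMsum nums k = pvP nums (k + 1) := by
  induction k with
  | zero =>
    rw [pv_P_succ]
    simp only [pvP, pvMsum, pvCnt, List.range_zero, List.map_nil, List.sum_nil, zero_add]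
    rw [pv_foldl_add, pv_foldl_add]
    simp
  | succ k ih =>
    rw [pv_P_succ, ← ih]
    unfold pvMsum pvCnt
    rw [pv_foldl_add, pv_foldl_add, pv_foldl_add]
    have : (nums.map (fun num => PySem.Int.band num ((1 <<< (k + 1 + 1)) - 1))).sum
        = (nums.map (fun num => PySem.Int.band num ((1 <<< (k + 1)) - 1)
            + PySem.Int.band (num >>> (k+1)) 1 * 2 ^ (k+1))).sum := by
      congr 1
      exact List.map_congr_left (fun x _ => pv_num_step x (k+1))
    rw [this, pv_sum_map_add, pv_sum_map_mul]
    ring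

theorem pv_getD_count (nums : List Int) (j : Nat) (hj : j < 60) :
    (((List.range 60).map (fun b => nums.foldl (fun s num => s + PySem.Int.band (num >>> b) 1) 0)).getD j 0)
      = pvCnt nums j := by
  rw [List.getD_eq_getElem?_getD, List.getElem?_map, List.getElem?_range hj]
  rfl

theorem pv_fold_eq (nums : List Int) :
    ∀ (n j : Nat), j + n ≤ 60 → ∀ (a : Int),
      (List.range' j n).foldl
        (fun ans bit =>
          let tail : Int := (1 <<< (bit + 1)) - 1
          let s : Int := nums.foldl (fun s num => s + PySem.Int.band num tail) 0
          if s ≥ (1 : Int) <<< bit then PySem.Int.bor ans ((1 : Int) <<< bit) else ans) a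
      = ((List.range' j n).foldl
          (fun (st : Int × Int) bit =>
            let running : Int := st.2 +
              (((List.range 60).map (fun b => nums.foldl (fun s num => s + PySem.Int.band (num >>> b) 1) 0)).getD bit 0) <<< bit
            (if running ≥ (1 : Int) <<< bit then PySem.Int.bor st.1 ((1 : Int) <<< bit) else st.1,
             running)) (a, pvP nums j)).1 := by
  intro n
  induction n with
  | zero => intro j _ a; simp
  | succ n ih =>
    intro j hj a
    rw [List.range'_succ, List.foldl_cons, List.foldl_cons]
    have hrun : pvP nums j + (((List.range 60).map (fun b => nums.foldl (fun s num => s + PySem.Int.band (num >>> b) 1) 0)).getD j 0) <<< j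
        = pvMsum nums j := by
      rw [pv_getD_count nums j (by omega), pv_msum_eq_P, pv_P_succ]
      have : pvCnt nums j <<< j = pvCnt nums j * 2 ^ j := by simp [Int.shiftLeft_eq]
      rw [this]
    simp only
    rw [hrun]
    have hs : nums.foldl (fun s num => s + PySem.Int.band num ((1 <<< (j + 1)) - 1)) 0 = pvMsum nums j := rfl
    rw [hs]
    rw [pv_msum_eq_P nums j]
    split
    · exact ih (j+1) (by omega) _
    · exact ih (j+1) (by omega) _

-- ===== VERDICT (by name: the statement is the Claim_ definition above) =====
theorem subsequenceSumOr_spec : Claim_equal_subsequenceSumOr := by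
  intro nums _
  show subsequenceSumOr nums = subsequenceSumOr_alt nums
  unfold subsequenceSumOr subsequenceSumOr_alt
  rw [List.range_eq_range']
  have h := pv_fold_eq nums 60 0 (by omega) 0
  simpa [pvP] using h
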